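-- pv_equiv track=rewrite | github.com/ethanpam/COMS-1270 | Lab-9/fourInSequence.py | checkForNextMoveWin
-- ===== SOURCE A (Python) =====
-- def getPlayerPiece(playerNumber):
--     """Returns a string corresponding to the 'player' under consideration. Player 0 corresponds to an 'empty' square.
--     Player 1 corresponds to the 'X' pieces. Player 2 corresponds to the 'O' pieces.
--
--     :param int playerNumber: The 'player' whose piece we wish to know.
--     :return string: piece - A string containing either '.', 'X', or 'O' for player 0 (empty), 1, or 2, respectively.
--     """
--     if playerNumber == 0:
--         return "."
--     elif playerNumber == 1:
--         return "X"
--     elif playerNumber == 2: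
--         return "O"
--     return "."
--
-- def checkForNextMoveWin(board, playerNumber):
--     """Checks all columns to see if dropping a piece there would cause a win for playerNumber.
--
--     :param list of lists board: The data structure that contains the contents of the gameboard.
--     :param int playerNumber: The player number whose move is being tested.
--     :return int: The column index that results in a win, or -1 if none.
--     """
--     piece = getPlayerPiece(playerNumber)
--     cols = len(board[0])
--
--     for col in range(cols):
--         row = getOpenRow(board, col)
--         if row != -1:
--             original = board[row][col]
--             board[row][col] = piece
--             if checkWinner(board, playerNumber):
--                 board[row][col] = original
--                 return col
--             board[row][col] = original
--
--     return -1
--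
-- def getOpenRow(board, col):
--     """Iterates through all the rows of a given column (col), from bottom to top in the gameboard, and returns the first open row it finds.
--
--     :param list of lists board: The data structure that contains the contents of the gameboard.
--     :param int col: The column to check.
--     :return int: row - The row index of the first empty row from the bottom of the gameboard. It returns -1 if no empty row is found.
--     """
--     empty = getPlayerPiece(0)
--     for row in range(len(board) - 1, -1, -1):
--         if board[row][col] == empty:
--             return row
--     return -1
--
-- def checkWinner(board, playerNumber):
--     """Checks the gameboard to see if a winning condition is present (4 in a row).
--
--     :param list of lists board: The data structure that contains the contents of the gameboard.
--     :param int playerNumber: The player number whose piece this function checks.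
--     :return boolean: Returns True if a winning condition is found. It returns False otherwise.
--     """
--     piece = getPlayerPiece(playerNumber)
--     rows = len(board)
--     cols = len(board[0])
--
--     # horizontal
--     for row in range(rows):
--         for col in range(cols - 3):
--             if (board[row][col] == piece and
--                 board[row][col + 1] == piece and
--                 board[row][col + 2] == piece and
--                 board[row][col + 3] == piece):
--                 return True
--
--     # vertical
--     for row in range(rows - 3):
--         for col in range(cols):
--             if (board[row][col] == piece and
--                 board[row + 1][col] == piece and
--                 board[row + 2][col] == piece and
--                 board[row + 3][col] == piece):
--                 return True
--
--     # negative slope diagonals (\)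
--     for row in range(rows - 3):
--         for col in range(cols - 3):
--             if (board[row][col] == piece and
--                 board[row + 1][col + 1] == piece and
--                 board[row + 2][col + 2] == piece and
--                 board[row + 3][col + 3] == piece):
--                 return True
--
--     # positive slope diagonals (/)
--     for row in range(3, rows):
--         for col in range(cols - 3):
--             if (board[row][col] == piece and
--                 board[row - 1][col + 1] == piece and
--                 board[row - 2][col + 2] == piece and
--                 board[row - 3][col + 3] == piece):
--                 return True
--
--     return False
-- ===== SOURCE B (Python) =====
-- def checkForNextMoveWin(board, playerNumber):
--     """Return the first column where dropping playerNumber's piece completes four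
--     in a row, or -1 if no column does.
--
--     Per column, only the four lines through the dropped cell are tested
--     (constant work per candidate), instead of re-scanning the whole board.
--     """
--     piece = {0: ".", 1: "X", 2: "O"}.get(playerNumber, ".")
--     rows = len(board)
--     cols = len(board[0])
--
--     def cell(r, c):
--         return board[r][c] if 0 <= r < rows and 0 <= c < cols else ""
--
--     def run(r, c, dr, dc):
--         n = 0
--         for k in range(1, 4):
--             if cell(r + k * dr, c + k * dc) != piece:
--                 break
--             n += 1
--         return n
--
--     for col in range(cols):
--         row = next((r for r in range(rows - 1, -1, -1) if board[r][col] == "."), -1)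
--         if row == -1:
--             continue
--         for dr, dc in ((0, 1), (1, 0), (1, 1), (-1, 1)):
--             if 1 + run(row, col, dr, dc) + run(row, col, -dr, -dc) >= 4:
--                 return col
--     return -1
-- ===== Notes on version B (the rewrite author's own statement) =====
-- stated objective: alternative
-- what changed: Instead of placing a piece in each column and re-scanning the whole board for a win, B tests only the four lines through the dropped cell of each column; Pre_ excludes empty/ragged boards (A's board[row][col] can raise IndexError) and boards that already contain a four-in-a-row of the player's piece, on which A's whole-board re-scan reports the first non-full column regardless of the move.
-- outside the precondition, e.g. on checkForNextMoveWin([['X', 'X', 'X', 'X'], ['.', '.', '.', '.']], 1): A returns 0, B returns -1; on checkForNextMoveWin([['.', 'X', 'X', 'X'], ['X']], 1): A returns 0, B returns 0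
import Mathlib
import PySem

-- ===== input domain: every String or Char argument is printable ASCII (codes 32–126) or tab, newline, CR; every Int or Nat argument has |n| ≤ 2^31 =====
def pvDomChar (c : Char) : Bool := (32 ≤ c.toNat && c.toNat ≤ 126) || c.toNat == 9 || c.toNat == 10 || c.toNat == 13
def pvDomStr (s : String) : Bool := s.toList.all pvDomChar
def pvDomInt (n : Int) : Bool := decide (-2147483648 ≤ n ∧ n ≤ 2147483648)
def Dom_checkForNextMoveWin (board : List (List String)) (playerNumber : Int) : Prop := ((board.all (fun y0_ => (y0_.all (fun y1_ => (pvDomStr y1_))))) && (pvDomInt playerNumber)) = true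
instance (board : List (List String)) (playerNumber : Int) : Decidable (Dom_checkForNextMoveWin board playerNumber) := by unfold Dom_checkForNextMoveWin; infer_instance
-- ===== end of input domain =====

-- B replaces A's per-column whole-board win re-scan by a check of only the four lines through
-- the dropped cell (objective: alternative). Python A temporarily mutates the board but restores it
-- before returning; the equivalence is about the return value.


-- ===== PORT A =====
-- board[r][c] (defaults are never reached on inputs admitted by Pre_).
def pvCell (board : List (List String)) (r c : Int) : String :=
  PySem.List.pyGetD (PySem.List.pyGetD board r []) c ""

def pvGetPlayerPiece (playerNumber : Int) : String :=
  if playerNumber == 0 then "." else if playerNumber == 1 then "X"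
  else if playerNumber == 2 then "O" else "."

-- A's checkWinner: four sequenced double scans, each over its own index ranges.
def pvCheckWinner (board : List (List String)) (playerNumber : Int) : Bool :=
  let piece := pvGetPlayerPiece playerNumber
  let rows : Int := board.length
  let cols : Int := (PySem.List.pyGetD board 0 []).length
  ((PySem.List.pyRange 0 rows 1).any fun row =>
    (PySem.List.pyRange 0 (cols - 3) 1).any fun col =>
      pvCell board row col == piece && pvCell board row (col + 1) == piece &&
      pvCell board row (col + 2) == piece && pvCell board row (col + 3) == piece) ||
  ((PySem.List.pyRange 0 (rows - 3) 1).any fun row =>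
    (PySem.List.pyRange 0 cols 1).any fun col =>
      pvCell board row col == piece && pvCell board (row + 1) col == piece &&
      pvCell board (row + 2) col == piece && pvCell board (row + 3) col == piece) ||
  ((PySem.List.pyRange 0 (rows - 3) 1).any fun row =>
    (PySem.List.pyRange 0 (cols - 3) 1).any fun col =>
      pvCell board row col == piece && pvCell board (row + 1) (col + 1) == piece &&
      pvCell board (row + 2) (col + 2) == piece && pvCell board (row + 3) (col + 3) == piece) ||
  ((PySem.List.pyRange 3 rows 1).any fun row =>
    (PySem.List.pyRange 0 (cols - 3) 1).any fun col =>
      pvCell board row col == piece && pvCell board (row - 1) (col + 1) == piece &&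
      pvCell board (row - 2) (col + 2) == piece && pvCell board (row - 3) (col + 3) == piece)

-- A's getOpenRow: first row from the bottom holding ".".
def pvGetOpenRow (board : List (List String)) (col : Int) : Int :=
  (((PySem.List.pyRange ((board.length : Int) - 1) (-1) (-1)).find? fun row =>
      pvCell board row col == pvGetPlayerPiece 0)).getD (-1)

-- board[row][col] = piece (functional update; A restores the cell afterwards).
def pvPlace (board : List (List String)) (row col : Int) (piece : String) : List (List String) :=
  board.set row.toNat ((PySem.List.pyGetD board row []).set col.toNat piece)

def checkForNextMoveWin (board : List (List String)) (playerNumber : Int) : Int :=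
  let piece := pvGetPlayerPiece playerNumber
  let cols : Int := (PySem.List.pyGetD board 0 []).length
  (((PySem.List.pyRange 0 cols 1).find? fun col =>
      let row := pvGetOpenRow board col
      row != -1 && pvCheckWinner (pvPlace board row col piece) playerNumber)).getD (-1)

-- ===== PORT B =====
def pvDirs : List (Int × Int) := [(0, 1), (1, 0), (1, 1), (-1, 1)]

-- Source B's bounded cell(r, c).
def pvCellB (board : List (List String)) (rows cols r c : Int) : String :=
  if 0 ≤ r ∧ r < rows ∧ 0 ≤ c ∧ c < cols then pvCell board r c else ""

-- Source B's run: count up to 3 consecutive own pieces in direction (dr, dc) (for-loop with break).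
def pvRun (board : List (List String)) (rows cols : Int) (piece : String) (r c dr dc : Int) : Int :=
  ((PySem.List.pyRange 1 4 1).foldl
    (fun (st : Int × Bool) k =>
      if st.2 then st
      else if pvCellB board rows cols (r + k * dr) (c + k * dc) == piece
           then (st.1 + 1, false) else (st.1, true))
    (0, false)).1

-- does dropping at (r, c) make four in a line through (r, c)?
def pvLocalWin (board : List (List String)) (rows cols : Int) (piece : String) (r c : Int) : Bool :=
  pvDirs.any fun d =>
    decide (4 ≤ 1 + pvRun board rows cols piece r c d.1 d.2
                  + pvRun board rows cols piece r c (-d.1) (-d.2))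

-- Source B's open row: first r from the bottom with board[r][col] == "." (next(…, -1)).
def pvOpenRowB (board : List (List String)) (c : Int) : Int :=
  (((PySem.List.pyRange ((board.length : Int) - 1) (-1) (-1)).find? fun r =>
      pvCell board r c == ".")).getD (-1)

def checkForNextMoveWin_alt (board : List (List String)) (playerNumber : Int) : Int :=
  -- Source B's {0: ".", 1: "X", 2: "O"}.get(playerNumber, ".")
  let piece := if playerNumber == 0 then "." else if playerNumber == 1 then "X"
               else if playerNumber == 2 then "O" else "."
  let rows : Int := board.length
  let cols : Int := (PySem.List.pyGetD board 0 []).length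
  (((PySem.List.pyRange 0 cols 1).find? fun c =>
      let r := pvOpenRowB board c
      r != -1 && pvLocalWin board rows cols piece r c)).getD (-1)

-- ===== PRECONDITION & SPEC =====
-- a four-in-a-row of `piece` already on the board (a board no game can reach for that player)
def pvHasWinB (board : List (List String)) (rows cols : Int) (piece : String) : Bool :=
  (PySem.List.pyRange 0 rows 1).any fun r =>
    (PySem.List.pyRange 0 cols 1).any fun c =>
      pvDirs.any fun d =>
        (PySem.List.pyRange 0 4 1).all fun k =>
          pvCellB board rows cols (r + k * d.1) (c + k * d.2) == piece

-- Pre_ excludes the empty board and ragged boards with a row shorter than the first (Python A's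
-- board[row][col] can raise IndexError there), and boards already containing a four-in-a-row of
-- the player's piece: on those A's whole-board re-scan reports the first non-full column no
-- matter what the move does, a value nobody would specify.
def Pre_checkForNextMoveWin (board : List (List String)) (playerNumber : Int) : Prop :=
  board ≠ [] ∧ (∀ row ∈ board, board.headI.length ≤ row.length) ∧
  pvHasWinB board (board.length : Int) (board.headI.length : Int)
    (pvGetPlayerPiece playerNumber) = false
instance (board : List (List String)) (playerNumber : Int) : Decidable (Pre_checkForNextMoveWin board playerNumber) := by unfold Pre_checkForNextMoveWin; infer_instance

def pvWitness_checkForNextMoveWin : List (List String) × Int :=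
  ([[".", ".", ".", "."], ["X", "O", "X", "O"]], 1)

def Spec_checkForNextMoveWin (board : List (List String)) (playerNumber : Int) (out : Int) : Prop := out = checkForNextMoveWin_alt board playerNumber
instance (board : List (List String)) (playerNumber : Int) (out : Int) : Decidable (Spec_checkForNextMoveWin board playerNumber out) := by unfold Spec_checkForNextMoveWin; infer_instance

-- ===== CLAIM (what is proved, stated in full; the proofs are below) =====
def Claim_equal_checkForNextMoveWin : Prop := ∀ (board : List (List String)) (playerNumber : Int), Dom_checkForNextMoveWin board playerNumber → Pre_checkForNextMoveWin board playerNumber → Spec_checkForNextMoveWin board playerNumber (checkForNextMoveWin board playerNumber)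

-- ===== LEMMAS AND PROOFS =====

-- a 4-window of `piece` for cell function `cell`, anchored at (x, y), direction d
def pvG (cell : Int → Int → String) (piece : String) (x y : Int) (d : Int × Int) : Prop :=
  ∀ k : Int, 0 ≤ k → k < 4 → cell (x + k * d.1) (y + k * d.2) = piece

def pvHasWin (cell : Int → Int → String) (piece : String) : Prop :=
  ∃ x y d, d ∈ pvDirs ∧ pvG cell piece x y d

-- a 4-window through (r, c): anchored j steps back along d
def pvThrough (cell : Int → Int → String) (piece : String) (r c : Int) (d : Int × Int) : Prop :=
  ∃ j : Int, 0 ≤ j ∧ j < 4 ∧ pvG cell piece (r - j * d.1) (c - j * d.2) d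

lemma pvG_iff (cell : Int → Int → String) (piece : String) (x y : Int) (d : Int × Int) :
    pvG cell piece x y d ↔
      (cell x y = piece ∧ cell (x + d.1) (y + d.2) = piece ∧
       cell (x + 2 * d.1) (y + 2 * d.2) = piece ∧ cell (x + 3 * d.1) (y + 3 * d.2) = piece) := by
  constructor
  · intro h
    refine ⟨?_, ?_, ?_, ?_⟩
    · simpa using h 0 (by norm_num) (by norm_num)
    · simpa using h 1 (by norm_num) (by norm_num)
    · simpa using h 2 (by norm_num) (by norm_num)
    · simpa using h 3 (by norm_num) (by norm_num)
  · rintro ⟨h0, h1, h2, h3⟩ k hk0 hk4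
    interval_cases k
    · simpa using h0
    · simpa using h1
    · simpa using h2
    · simpa using h3

lemma pvPiece_ne_empty (p : Int) : pvGetPlayerPiece p ≠ "" := by
  unfold pvGetPlayerPiece; split_ifs <;> decide

lemma pvCellB_bounds {board : List (List String)} {R C x y : Int} {s : String}
    (h : pvCellB board R C x y = s) (hs : s ≠ "") :
    (0 ≤ x ∧ x < R ∧ 0 ≤ y ∧ y < C) ∧ pvCell board x y = s := by
  unfold pvCellB at h
  split_ifs at h with hb
  · exact ⟨hb, h⟩
  · exact absurd h.symm hs

lemma pvCellB_eq_piece {board : List (List String)} {R C x y : Int} {piece : String}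
    (h : pvCell board x y = piece) (h0 : 0 ≤ x) (h1 : x < R) (h2 : 0 ≤ y) (h3 : y < C) :
    pvCellB board R C x y = piece := by
  unfold pvCellB; rw [if_pos ⟨h0, h1, h2, h3⟩]; exact h

-- A's checkWinner finds exactly the windows of the bounded cell function
lemma pvCheckWinner_iff (board : List (List String)) (p : Int) :
    pvCheckWinner board p = true ↔
      pvHasWin (pvCellB board (board.length : Int) ((PySem.List.pyGetD board 0 []).length : Int))
        (pvGetPlayerPiece p) := by
  set R : Int := (board.length : Int) with hR
  set C : Int := ((PySem.List.pyGetD board 0 []).length : Int) with hC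
  set piece := pvGetPlayerPiece p with hp
  have hpe : piece ≠ "" := pvPiece_ne_empty p
  unfold pvCheckWinner pvHasWin
  simp only [Bool.or_eq_true, List.any_eq_true, Bool.and_eq_true, beq_iff_eq,
    PySem.List.mem_pyRange_one, ← hR, ← hC, ← hp]
  constructor
  · intro h
    rcases h with ((h | h) | h) | h <;>
      obtain ⟨r, hr, c, hc, ⟨⟨h1, h2⟩, h3⟩, h4⟩ := h
    · refine ⟨r, c, (0, 1), by simp [pvDirs], (pvG_iff _ _ _ _ _).mpr ?_⟩
      norm_num
      exact ⟨pvCellB_eq_piece h1 (by omega) (by omega) (by omega) (by omega),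
             pvCellB_eq_piece h2 (by omega) (by omega) (by omega) (by omega),
             pvCellB_eq_piece h3 (by omega) (by omega) (by omega) (by omega),
             pvCellB_eq_piece h4 (by omega) (by omega) (by omega) (by omega)⟩
    · refine ⟨r, c, (1, 0), by simp [pvDirs], (pvG_iff _ _ _ _ _).mpr ?_⟩
      norm_num
      exact ⟨pvCellB_eq_piece h1 (by omega) (by omega) (by omega) (by omega),
             pvCellB_eq_piece h2 (by omega) (by omega) (by omega) (by omega),
             pvCellB_eq_piece h3 (by omega) (by omega) (by omega) (by omega),
             pvCellB_eq_piece h4 (by omega) (by omega) (by omega) (by omega)⟩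
    · refine ⟨r, c, (1, 1), by simp [pvDirs], (pvG_iff _ _ _ _ _).mpr ?_⟩
      norm_num
      exact ⟨pvCellB_eq_piece h1 (by omega) (by omega) (by omega) (by omega),
             pvCellB_eq_piece h2 (by omega) (by omega) (by omega) (by omega),
             pvCellB_eq_piece h3 (by omega) (by omega) (by omega) (by omega),
             pvCellB_eq_piece h4 (by omega) (by omega) (by omega) (by omega)⟩
    · refine ⟨r, c, (-1, 1), by simp [pvDirs], (pvG_iff _ _ _ _ _).mpr ?_⟩
      norm_num
      exact ⟨pvCellB_eq_piece h1 (by omega) (by omega) (by omega) (by omega),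
             pvCellB_eq_piece h2 (by omega) (by omega) (by omega) (by omega),
             pvCellB_eq_piece h3 (by omega) (by omega) (by omega) (by omega),
             pvCellB_eq_piece h4 (by omega) (by omega) (by omega) (by omega)⟩
  · rintro ⟨x, y, d, hd, hG⟩
    rw [pvG_iff] at hG
    simp only [pvDirs, List.mem_cons, List.not_mem_nil, or_false] at hd
    rcases hd with rfl | rfl | rfl | rfl <;> norm_num at hG <;>
      obtain ⟨g1, g2, g3, g4⟩ := hG
    · obtain ⟨b1, c1⟩ := pvCellB_bounds g1 hpe
      obtain ⟨b2, c2⟩ := pvCellB_bounds g2 hpe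
      obtain ⟨b3, c3⟩ := pvCellB_bounds g3 hpe
      obtain ⟨b4, c4⟩ := pvCellB_bounds g4 hpe
      exact Or.inl (Or.inl (Or.inl ⟨x, ⟨by omega, by omega⟩, y, ⟨by omega, by omega⟩, ⟨⟨c1, c2⟩, c3⟩, c4⟩))
    · obtain ⟨b1, c1⟩ := pvCellB_bounds g1 hpe
      obtain ⟨b2, c2⟩ := pvCellB_bounds g2 hpe
      obtain ⟨b3, c3⟩ := pvCellB_bounds g3 hpe
      obtain ⟨b4, c4⟩ := pvCellB_bounds g4 hpe
      exact Or.inl (Or.inl (Or.inr ⟨x, ⟨by omega, by omega⟩, y, ⟨by omega, by omega⟩, ⟨⟨c1, c2⟩, c3⟩, c4⟩))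
    · obtain ⟨b1, c1⟩ := pvCellB_bounds g1 hpe
      obtain ⟨b2, c2⟩ := pvCellB_bounds g2 hpe
      obtain ⟨b3, c3⟩ := pvCellB_bounds g3 hpe
      obtain ⟨b4, c4⟩ := pvCellB_bounds g4 hpe
      exact Or.inl (Or.inr ⟨x, ⟨by omega, by omega⟩, y, ⟨by omega, by omega⟩, ⟨⟨c1, c2⟩, c3⟩, c4⟩)
    · obtain ⟨b1, c1⟩ := pvCellB_bounds g1 hpe
      obtain ⟨b2, c2⟩ := pvCellB_bounds g2 hpe
      obtain ⟨b3, c3⟩ := pvCellB_bounds g3 hpe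
      obtain ⟨b4, c4⟩ := pvCellB_bounds g4 hpe
      exact Or.inr ⟨x, ⟨by omega, by omega⟩, y, ⟨by omega, by omega⟩, ⟨⟨c1, c2⟩, c3⟩, c4⟩

-- Pre_'s no-existing-win condition characterised by the same windows
lemma pvHasWinB_iff (board : List (List String)) (R C : Int) (piece : String) (hpe : piece ≠ "") :
    pvHasWinB board R C piece = true ↔ pvHasWin (pvCellB board R C) piece := by
  unfold pvHasWinB pvHasWin
  simp only [List.any_eq_true, List.all_eq_true, beq_iff_eq, PySem.List.mem_pyRange_one]
  constructor
  · rintro ⟨r, hr, c, hc, d, hd, hall⟩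
    exact ⟨r, c, d, hd, fun k hk0 hk4 => hall k ⟨hk0, hk4⟩⟩
  · rintro ⟨x, y, d, hd, hG⟩
    have h0 := hG 0 (by norm_num) (by norm_num)
    simp only [zero_mul, add_zero] at h0
    obtain ⟨hb, -⟩ := pvCellB_bounds h0 hpe
    exact ⟨x, ⟨hb.1, hb.2.1⟩, y, ⟨hb.2.2.1, hb.2.2.2⟩, d, hd, fun k hk => hG k hk.1 hk.2⟩

-- updating the open cell (r, c): the bounded cell function of the placed board
lemma pvCellB_place (board : List (List String)) (R C r c : Int) (piece : String)
    (hR : R = (board.length : Int)) (hr : 0 ≤ r ∧ r < R) (hc : 0 ≤ c ∧ c < C)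
    (hdot : pvCell board r c = ".") (x y : Int) :
    pvCellB (pvPlace board r c piece) R C x y =
      if x = r ∧ y = c then piece else pvCellB board R C x y := by
  obtain ⟨hr0, hrR⟩ := hr
  obtain ⟨hc0, hcC⟩ := hc
  have hrl : r.toNat < board.length := by omega
  unfold pvCell at hdot
  rw [PySem.List.pyGetD_of_nonneg _ _ hr0, PySem.List.pyGetD_of_nonneg _ _ hc0,
      List.getD_eq_getElem?_getD, List.getD_eq_getElem?_getD, List.getElem?_eq_getElem hrl] at hdot
  simp only [Option.getD_some] at hdot
  have hclen : c.toNat < (board[r.toNat]).length := by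
    by_contra hlen
    rw [List.getElem?_eq_none (by omega), Option.getD_none] at hdot
    exact absurd hdot (by decide)
  have houter : ∀ z : Int, 0 ≤ z → PySem.List.pyGetD (pvPlace board r c piece) z [] =
      if z.toNat = r.toNat then (board[r.toNat]).set c.toNat piece else PySem.List.pyGetD board z [] := by
    intro z hz
    unfold pvPlace
    rw [PySem.List.pyGetD_of_nonneg _ _ hz, PySem.List.pyGetD_of_nonneg _ _ hz,
        List.getD_eq_getElem?_getD, List.getD_eq_getElem?_getD, List.getElem?_set]
    by_cases hzr : r.toNat = z.toNat
    · rw [if_pos hzr, if_pos (by omega), if_pos hzr.symm]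
      rw [PySem.List.pyGetD_of_nonneg _ _ hr0, List.getD_eq_getElem?_getD,
          List.getElem?_eq_getElem hrl]
      simp
    · rw [if_neg hzr, if_neg (fun h => hzr h.symm)]
  by_cases hxy : x = r ∧ y = c
  · obtain ⟨rfl, rfl⟩ := hxy
    rw [if_pos ⟨rfl, rfl⟩]
    unfold pvCellB
    rw [if_pos ⟨hr0, hrR, hc0, hcC⟩]
    unfold pvCell
    rw [houter x hr0, if_pos rfl, PySem.List.pyGetD_of_nonneg _ _ hc0,
        List.getD_eq_getElem?_getD, List.getElem?_set, if_pos rfl, if_pos hclen]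
    simp
  · rw [if_neg hxy]
    unfold pvCellB
    by_cases hb : 0 ≤ x ∧ x < R ∧ 0 ≤ y ∧ y < C
    · rw [if_pos hb, if_pos hb]
      unfold pvCell
      obtain ⟨hx0, hxR, hy0, hyC⟩ := hb
      rw [houter x hx0]
      by_cases hx : x.toNat = r.toNat
      · have hxr : x = r := by omega
        have hy : y ≠ c := fun h => hxy ⟨hxr, h⟩
        rw [if_pos hx, hxr, PySem.List.pyGetD_of_nonneg _ _ hr0,
            PySem.List.pyGetD_of_nonneg _ _ hy0, PySem.List.pyGetD_of_nonneg _ _ hy0,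
            List.getD_eq_getElem?_getD, List.getD_eq_getElem?_getD, List.getD_eq_getElem?_getD,
            List.getElem?_set, List.getElem?_eq_getElem hrl]
        rw [if_neg (by omega)]
        simp
      · rw [if_neg hx]
    · rw [if_neg hb, if_neg hb]

-- window decomposition: a window of the placed board is an old window or one through (r, c)
lemma pvHasWin_place_iff (cellb : Int → Int → String) (piece : String) (r c : Int) :
    pvHasWin (fun x y => if x = r ∧ y = c then piece else cellb x y) piece ↔
      (pvHasWin cellb piece ∨
       ∃ d ∈ pvDirs, pvThrough (fun x y => if x = r ∧ y = c then piece else cellb x y) piece r c d) := by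
  constructor
  · rintro ⟨x, y, d, hd, hG⟩
    by_cases hhit : ∃ k : Int, 0 ≤ k ∧ k < 4 ∧ x + k * d.1 = r ∧ y + k * d.2 = c
    · obtain ⟨j, hj0, hj4, hxr, hyc⟩ := hhit
      refine Or.inr ⟨d, hd, j, hj0, hj4, ?_⟩
      have e1 : r - j * d.1 = x := by linarith
      have e2 : c - j * d.2 = y := by linarith
      rw [e1, e2]; exact hG
    · push Not at hhit
      refine Or.inl ⟨x, y, d, hd, fun k hk0 hk4 => ?_⟩
      have hthis := hG k hk0 hk4
      simp only at hthis
      have hne : ¬(x + k * d.1 = r ∧ y + k * d.2 = c) := by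
        rintro ⟨ha, hb⟩; exact hhit k hk0 hk4 ha hb
      rwa [if_neg hne] at hthis
  · rintro (⟨x, y, d, hd, hG⟩ | ⟨d, hd, j, hj0, hj4, hG⟩)
    · refine ⟨x, y, d, hd, fun k hk0 hk4 => ?_⟩
      have hthis := hG k hk0 hk4
      simp only
      by_cases hc2 : x + k * d.1 = r ∧ y + k * d.2 = c
      · rw [if_pos hc2]
      · rw [if_neg hc2]; exact hthis
    · exact ⟨r - j * d.1, c - j * d.2, d, hd, hG⟩

-- B's local check finds exactly the windows through (r, c)
lemma pvRun_eq (board : List (List String)) (R C : Int) (piece : String) (r c dr dc : Int) :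
    pvRun board R C piece r c dr dc =
      if pvCellB board R C (r + 1 * dr) (c + 1 * dc) == piece then
        if pvCellB board R C (r + 2 * dr) (c + 2 * dc) == piece then
          if pvCellB board R C (r + 3 * dr) (c + 3 * dc) == piece then 3 else 2
        else 1
      else 0 := by
  unfold pvRun
  have h : PySem.List.pyRange 1 4 1 = [1, 2, 3] := by decide
  rw [h]
  by_cases hb1 : pvCellB board R C (r + dr) (c + dc) = piece <;>
    by_cases hb2 : pvCellB board R C (r + 2 * dr) (c + 2 * dc) = piece <;>
      by_cases hb3 : pvCellB board R C (r + 3 * dr) (c + 3 * dc) = piece <;>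
        simp [List.foldl, hb1, hb2, hb3]

lemma pvRun_bounds (board : List (List String)) (R C : Int) (piece : String) (r c dr dc : Int) :
    0 ≤ pvRun board R C piece r c dr dc ∧ pvRun board R C piece r c dr dc ≤ 3 := by
  rw [pvRun_eq]; split_ifs <;> norm_num

lemma pvRun_ge (board : List (List String)) (R C : Int) (piece : String) (r c dr dc : Int)
    (m : Int) (hm0 : 0 ≤ m) (hm3 : m ≤ 3) :
    m ≤ pvRun board R C piece r c dr dc ↔
      ∀ i : Int, 1 ≤ i → i ≤ m → pvCellB board R C (r + i * dr) (c + i * dc) = piece := by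
  rw [pvRun_eq]
  split_ifs with h1 h2 h3
  · rw [beq_iff_eq] at h1 h2 h3
    constructor
    · intro _ i hi1 him
      have hi3 : i ≤ 3 := by omega
      interval_cases i
      exacts [h1, h2, h3]
    · intro _; exact hm3
  · rw [beq_iff_eq] at h1 h2
    simp only [beq_iff_eq] at h3
    constructor
    · intro hm i hi1 him
      have hi2 : i ≤ 2 := by omega
      interval_cases i
      exacts [h1, h2]
    · intro hall
      by_contra hgt
      exact h3 (hall 3 (by omega) (by omega))
  · rw [beq_iff_eq] at h1
    simp only [beq_iff_eq] at h2
    constructor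
    · intro hm i hi1 him
      have hi2 : i ≤ 1 := by omega
      interval_cases i
      exact h1
    · intro hall
      by_contra hgt
      exact h2 (hall 2 (by omega) (by omega))
  · simp only [beq_iff_eq] at h1
    constructor
    · intro hm i hi1 him
      omega
    · intro hall
      by_contra hgt
      exact h1 (hall 1 (by omega) (by omega))

lemma pvOffCenter {d : Int × Int} (hdnz : ¬(d.1 = 0 ∧ d.2 = 0)) {m : Int} (hm : m ≠ 0)
    (r c : Int) : ¬(r + m * d.1 = r ∧ c + m * d.2 = c) := by
  rintro ⟨ha, hb⟩
  refine hdnz ⟨?_, ?_⟩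
  · rcases mul_eq_zero.mp (by linarith : m * d.1 = 0) with h | h
    · omega
    · exact h
  · rcases mul_eq_zero.mp (by linarith : m * d.2 = 0) with h | h
    · omega
    · exact h

lemma pvThrough_iff_runs (board : List (List String)) (R C : Int) (piece : String) (r c : Int)
    (d : Int × Int) (hdnz : ¬(d.1 = 0 ∧ d.2 = 0)) :
    pvThrough (fun x y => if x = r ∧ y = c then piece else pvCellB board R C x y) piece r c d ↔
      3 ≤ pvRun board R C piece r c d.1 d.2 + pvRun board R C piece r c (-d.1) (-d.2) := by
  obtain ⟨hF0, hF3⟩ := pvRun_bounds board R C piece r c d.1 d.2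
  obtain ⟨hB0, hB3⟩ := pvRun_bounds board R C piece r c (-d.1) (-d.2)
  constructor
  · rintro ⟨j, hj0, hj4, hG⟩
    have hB : j ≤ pvRun board R C piece r c (-d.1) (-d.2) := by
      rw [pvRun_ge board R C piece r c (-d.1) (-d.2) j hj0 (by omega)]
      intro i hi1 hij
      have hthis := hG (j - i) (by omega) (by omega)
      simp only at hthis
      have e1 : r - j * d.1 + (j - i) * d.1 = r + i * -d.1 := by ring
      have e2 : c - j * d.2 + (j - i) * d.2 = c + i * -d.2 := by ring
      rw [e1, e2] at hthis
      have hne := pvOffCenter hdnz (show (-i : Int) ≠ 0 by omega) r c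
      rw [show -i * d.1 = i * -d.1 by ring, show -i * d.2 = i * -d.2 by ring] at hne
      rwa [if_neg hne] at hthis
    have hF : 3 - j ≤ pvRun board R C piece r c d.1 d.2 := by
      rw [pvRun_ge board R C piece r c d.1 d.2 (3 - j) (by omega) (by omega)]
      intro i hi1 hij
      have hthis := hG (j + i) (by omega) (by omega)
      simp only at hthis
      have e1 : r - j * d.1 + (j + i) * d.1 = r + i * d.1 := by ring
      have e2 : c - j * d.2 + (j + i) * d.2 = c + i * d.2 := by ring
      rw [e1, e2] at hthis
      have hne := pvOffCenter hdnz (show (i : Int) ≠ 0 by omega) r c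
      rwa [if_neg hne] at hthis
    omega
  · intro h3
    refine ⟨3 - pvRun board R C piece r c d.1 d.2, by omega, by omega, ?_⟩
    set F := pvRun board R C piece r c d.1 d.2 with hFdef
    intro k hk0 hk4
    simp only
    rcases lt_trichotomy k (3 - F) with hk | hk | hk
    · -- backward side: i := (3 - F) - k ∈ [1, j]
      have hi := (pvRun_ge board R C piece r c (-d.1) (-d.2) (3 - F) (by omega) (by omega)).mp
        (by omega) ((3 - F) - k) (by omega) (by omega)
      have e1 : r - (3 - F) * d.1 + k * d.1 = r + ((3 - F) - k) * -d.1 := by ring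
      have e2 : c - (3 - F) * d.2 + k * d.2 = c + ((3 - F) - k) * -d.2 := by ring
      rw [e1, e2]
      have hne := pvOffCenter hdnz (show -((3 - F) - k) ≠ 0 by omega) r c
      rw [show -((3 - F) - k) * d.1 = ((3 - F) - k) * -d.1 by ring,
          show -((3 - F) - k) * d.2 = ((3 - F) - k) * -d.2 by ring] at hne
      rw [if_neg hne]
      exact hi
    · subst hk
      rw [if_pos ⟨by ring, by ring⟩]
    · -- forward side: i := k - (3 - F) ∈ [1, F]
      have hi := (pvRun_ge board R C piece r c d.1 d.2 F (by omega) (by omega)).mp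
        (le_refl F) (k - (3 - F)) (by omega) (by omega)
      have e1 : r - (3 - F) * d.1 + k * d.1 = r + (k - (3 - F)) * d.1 := by ring
      have e2 : c - (3 - F) * d.2 + k * d.2 = c + (k - (3 - F)) * d.2 := by ring
      rw [e1, e2]
      have hne := pvOffCenter hdnz (show (k - (3 - F)) ≠ 0 by omega) r c
      rw [if_neg hne]
      exact hi

lemma pvLocalWin_iff (board : List (List String)) (R C : Int) (piece : String) (r c : Int) :
    pvLocalWin board R C piece r c = true ↔
      ∃ d ∈ pvDirs, pvThrough (fun x y => if x = r ∧ y = c then piece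
                               else pvCellB board R C x y) piece r c d := by
  unfold pvLocalWin
  rw [List.any_eq_true]
  have hdnz : ∀ d ∈ pvDirs, ¬(d.1 = 0 ∧ d.2 = 0) := by decide
  constructor
  · rintro ⟨d, hd, hh⟩
    rw [decide_eq_true_iff] at hh
    exact ⟨d, hd, (pvThrough_iff_runs board R C piece r c d (hdnz d hd)).mpr (by omega)⟩
  · rintro ⟨d, hd, hh⟩
    refine ⟨d, hd, ?_⟩
    rw [decide_eq_true_iff]
    have := (pvThrough_iff_runs board R C piece r c d (hdnz d hd)).mp hh
    omega

lemma pvFind?_congr {α : Type} {l : List α} {p q : α → Bool} (h : ∀ x ∈ l, p x = q x) :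
    l.find? p = l.find? q := by
  induction l with
  | nil => rfl
  | cons a t ih =>
    simp only [List.find?_cons]
    rw [h a (List.mem_cons_self)]
    cases hq : q a
    · exact ih fun x hx => h x (List.mem_cons_of_mem _ hx)
    · rfl

lemma pvOpenRowB_eq (board : List (List String)) (c : Int) :
    pvOpenRowB board c = pvGetOpenRow board c := by
  unfold pvOpenRowB pvGetOpenRow pvGetPlayerPiece
  norm_num

lemma pvGetOpenRow_spec (board : List (List String)) (c : Int)
    (h : pvGetOpenRow board c ≠ -1) :
    (0 ≤ pvGetOpenRow board c ∧ pvGetOpenRow board c < (board.length : Int)) ∧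
      pvCell board (pvGetOpenRow board c) c = "." := by
  unfold pvGetOpenRow at *
  cases hf : (PySem.List.pyRange ((board.length : Int) - 1) (-1) (-1)).find? fun row =>
      pvCell board row c == pvGetPlayerPiece 0 with
  | none => rw [hf] at h; simp at h
  | some row =>
    have hmem := List.mem_of_find?_eq_some hf
    rw [PySem.List.mem_pyRange_neg_one] at hmem
    have hp := List.find?_some hf
    rw [beq_iff_eq] at hp
    simp only [Option.getD_some]
    exact ⟨⟨by omega, by omega⟩, hp⟩

lemma pvPlace_length (board : List (List String)) (r c : Int) (piece : String) :
    ((pvPlace board r c piece).length : Int) = (board.length : Int) := by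
  unfold pvPlace; simp

lemma pvPlace_row0_len (board : List (List String)) (r c : Int) (piece : String)
    (hr0 : 0 ≤ r) (hrl : r < (board.length : Int)) :
    ((PySem.List.pyGetD (pvPlace board r c piece) 0 []).length : Int) =
      ((PySem.List.pyGetD board 0 []).length : Int) := by
  unfold pvPlace
  rw [PySem.List.pyGetD_of_nonneg _ _ (le_refl 0), PySem.List.pyGetD_of_nonneg _ _ (le_refl 0),
      List.getD_eq_getElem?_getD, List.getD_eq_getElem?_getD, List.getElem?_set]
  simp only [Int.toNat_zero]
  by_cases h0 : r.toNat = 0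
  · rw [if_pos h0, if_pos (by omega)]
    simp only [Option.getD_some, List.length_set]
    have hr : r = 0 := by omega
    subst hr
    simp [PySem.List.pyGetD_of_nonneg _ _ (le_refl 0), List.getD_eq_getElem?_getD]
  · rw [if_neg h0]

lemma pvHeadI_eq (board : List (List String)) (hne : board ≠ []) :
    PySem.List.pyGetD board 0 [] = board.headI := by
  cases board with
  | nil => exact absurd rfl hne
  | cons h t => simp [PySem.List.pyGetD]

theorem checkForNextMoveWin_spec : Claim_equal_checkForNextMoveWin := by
  unfold Claim_equal_checkForNextMoveWin
  intro board p _ hpre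
  obtain ⟨hne, -, hnowin⟩ := hpre
  unfold Spec_checkForNextMoveWin checkForNextMoveWin checkForNextMoveWin_alt
  simp only []
  set piece := pvGetPlayerPiece p with hpiece
  have hpe : piece ≠ "" := pvPiece_ne_empty p
  set R : Int := (board.length : Int) with hR
  set C : Int := ((PySem.List.pyGetD board 0 []).length : Int) with hC
  have hpieceB : (if p == 0 then "." else if p == 1 then "X"
                  else if p == 2 then "O" else ".") = piece := rfl
  rw [hpieceB]
  have hCeq : (board.headI.length : Int) = C := by rw [hC, pvHeadI_eq board hne]
  have hpw : pvHasWinB board R C piece = false := by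
    rw [← hCeq]; exact hnowin
  have hnoHas : ¬ pvHasWin (pvCellB board R C) piece := by
    intro h
    rw [← pvHasWinB_iff board R C piece hpe] at h
    rw [hpw] at h
    exact absurd h (by decide)
  congr 1
  apply pvFind?_congr
  intro col hcol'
  rw [PySem.List.mem_pyRange_one] at hcol'
  obtain ⟨hc0, hcC⟩ := hcol'
  rw [pvOpenRowB_eq]
  by_cases hrow : pvGetOpenRow board col = -1
  · rw [hrow]; simp
  · obtain ⟨⟨hr0, hrR⟩, hdot⟩ := pvGetOpenRow_spec board col hrow
    set row := pvGetOpenRow board col with hrowdef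
    have hchain : pvCheckWinner (pvPlace board row col piece) p = true ↔
        (pvHasWin (pvCellB board R C) piece ∨ pvLocalWin board R C piece row col = true) := by
      rw [pvCheckWinner_iff]
      rw [show ((pvPlace board row col piece).length : Int) = R from pvPlace_length board row col piece]
      rw [show ((PySem.List.pyGetD (pvPlace board row col piece) 0 []).length : Int) = C from
            pvPlace_row0_len board row col piece hr0 hrR]
      rw [show (pvCellB (pvPlace board row col piece) R C) =
            (fun x y => if x = row ∧ y = col then piece else pvCellB board R C x y) from
            funext fun x => funext fun y =>
              pvCellB_place board R C row col piece hR ⟨hr0, hrR⟩ ⟨hc0, hcC⟩ hdot x y]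
      rw [pvHasWin_place_iff]
      rw [← pvLocalWin_iff board R C piece row col]
    have hne' : (row != -1) = true := by simp [hrow]
    rw [hne', Bool.true_and, Bool.true_and]
    refine (Bool.eq_iff_iff).mpr ⟨fun h => ?_, fun h => ?_⟩
    · rcases hchain.mp h with h' | h'
      · exact absurd h' hnoHas
      · exact h'
    · exact hchain.mpr (Or.inr h)
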